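-- pv_equiv track=rewrite | github.com/seaniboi-prog/DRL-Multi-Drone-Navigation | MultiTSP/utils.py | generate_labels
-- ===== SOURCE A (Python) =====
-- import string
--
-- def generate_labels(num_labels):
--     labels = []
--     letters = string.ascii_uppercase
--     while num_labels > 0:
--         num_labels -= 1
--         labels.append(letters[num_labels % 26])
--         num_labels //= 26
--
--     return ''.join(reversed(labels))
-- ===== SOURCE B (Python) =====
-- import string
--
-- def generate_labels(num_labels):
--     # Two-phase conversion: first find the digit count, then extract the
--     # letters most-significant-first with powers of 26 (no list reversal).
--     if num_labels <= 0:
--         return ''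
--     length = 1
--     block = 26
--     total = 26
--     while num_labels > total:
--         length += 1
--         block *= 26
--         total += block
--     j = num_labels - (total - block) - 1
--     out = []
--     for _ in range(length):
--         block //= 26
--         out.append(string.ascii_uppercase[j // block])
--         j %= block
--     return ''.join(out)
-- ===== Notes on version B (the rewrite author's own statement) =====
-- stated objective: alternative
-- what changed: Replaces the least-significant-first while loop that appends letters to a list and joins its reversal with a two-phase conversion: first a loop finds the label length and the geometric prefix sums of powers of 26, then the letters are emitted most-significant-first by dividing by decreasing powers of 26, so no list reversal is needed.
import Mathlib
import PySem

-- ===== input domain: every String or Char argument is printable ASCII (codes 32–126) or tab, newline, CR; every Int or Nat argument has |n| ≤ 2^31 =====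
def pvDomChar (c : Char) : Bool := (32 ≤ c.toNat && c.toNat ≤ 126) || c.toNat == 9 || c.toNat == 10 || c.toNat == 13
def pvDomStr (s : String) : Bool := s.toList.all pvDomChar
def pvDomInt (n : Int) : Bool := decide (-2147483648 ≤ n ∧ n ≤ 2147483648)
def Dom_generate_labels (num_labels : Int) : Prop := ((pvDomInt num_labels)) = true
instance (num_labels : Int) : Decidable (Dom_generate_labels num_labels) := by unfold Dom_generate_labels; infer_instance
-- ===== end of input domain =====

-- B replaces A's least-significant-first append-then-reverse loop by a two-phase
-- conversion (find the digit count, then emit digits most-significant-first by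
-- powers of 26); objective: alternative, same cost.

-- ===== PORT A =====
-- letters[i] for i in [0,26), so pyGet? always succeeds; getD is exact here.
def pvLetter (i : Int) : Char := (PySem.Str.pyGet? "ABCDEFGHIJKLMNOPQRSTUVWXYZ" i).getD ' '

def pvLoopA (num_labels : Int) (labels : List Char) : List Char :=
  if 0 < num_labels then
    pvLoopA (PySem.Int.floordiv (num_labels - 1) 26)
      (labels ++ [pvLetter (PySem.Int.mod (num_labels - 1) 26)])
  else labels
termination_by num_labels.toNat
decreasing_by
  rw [PySem.Int.floordiv_eq_ediv_of_pos (by omega : (0:Int) < 26)]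
  omega

def generate_labels (num_labels : Int) : String :=
  String.ofList (pvLoopA num_labels []).reverse

-- ===== PORT B =====
-- while num_labels > total: length += 1; block *= 26; total += block
-- (the positivity argument only justifies termination; Python needs none)
def pvGrow (n length block total : Int) (hb : 0 < block) : Int × Int × Int :=
  if _h : total < n then
    pvGrow n (length + 1) (block * 26) (total + block * 26) (by omega)
  else (length, block, total)
termination_by (n - total).toNat
decreasing_by omega

-- for _ in range(length): block //= 26; out.append(letters[j // block]); j %= block
def pvEmit (count j block : Int) (out : List Char) : List Char :=
  if 0 < count then
    pvEmit (count - 1) (PySem.Int.mod j (PySem.Int.floordiv block 26))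
      (PySem.Int.floordiv block 26)
      (out ++ [pvLetter (PySem.Int.floordiv j (PySem.Int.floordiv block 26))])
  else out
termination_by count.toNat
decreasing_by omega

def generate_labels_alt (num_labels : Int) : String :=
  if num_labels ≤ 0 then ""
  else
    let r := pvGrow num_labels 1 26 26 (by omega)
    let j := num_labels - (r.2.2 - r.2.1) - 1
    String.ofList (pvEmit r.1 j r.2.1 [])

-- ===== PRECONDITION & SPEC =====
def Spec_generate_labels (num_labels : Int) (out : String) : Prop := out = generate_labels_alt num_labels
instance (num_labels : Int) (out : String) : Decidable (Spec_generate_labels num_labels out) := by unfold Spec_generate_labels; infer_instance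

-- ===== CLAIM (what is proved, stated in full; the proofs are below) =====
def Claim_equal_generate_labels : Prop := ∀ (num_labels : Int), Dom_generate_labels num_labels → Spec_generate_labels num_labels (generate_labels num_labels)

-- ===== LEMMAS AND PROOFS =====

-- Reference recursion: the bijective base-26 label, least-significant digit peeled first.
def pvRec (n : Int) : String :=
  if n ≤ 0 then ""
  else pvRec (PySem.Int.floordiv (n - 1) 26) ++ String.ofList [pvLetter (PySem.Int.mod (n - 1) 26)]
termination_by n.toNat
decreasing_by
  rw [PySem.Int.floordiv_eq_ediv_of_pos (by omega : (0:Int) < 26)]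
  omega

-- pvGeom k = 26 + 26^2 + … + 26^k
def pvGeom : Nat → Int
  | 0 => 0
  | k + 1 => 26 * (pvGeom k + 1)

theorem pvGeom_nonneg (k : Nat) : 0 ≤ pvGeom k := by
  induction k with
  | zero => simp [pvGeom]
  | succ k ih => simp only [pvGeom]; omega

theorem pvGeom_succ_pow (k : Nat) : pvGeom (k + 1) = pvGeom k + 26 ^ (k + 1) := by
  induction k with
  | zero => simp [pvGeom]
  | succ k ih =>
    calc pvGeom (k + 2) = 26 * (pvGeom (k + 1) + 1) := rfl
      _ = 26 * ((pvGeom k + 1) + 26 ^ (k + 1)) := by rw [ih]; ring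
      _ = pvGeom (k + 1) + 26 ^ (k + 2) := by simp only [pvGeom]; ring

theorem pvGrow_congr (n L L' block block' total total' : Int) (hb : 0 < block) (hb' : 0 < block')
    (hL : L = L') (hB : block = block') (hT : total = total') :
    pvGrow n L block total hb = pvGrow n L' block' total' hb' := by
  subst hL; subst hB; subst hT; rfl

-- A's loop equals the reference recursion.
theorem pvLoopA_rec (num_labels : Int) (labels : List Char) :
    String.ofList (pvLoopA num_labels labels).reverse
      = pvRec num_labels ++ String.ofList labels.reverse := by
  induction num_labels, labels using pvLoopA.induct with
  | case1 n acc h ih =>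
    rw [pvLoopA, if_pos h, ih]
    conv_rhs => rw [pvRec, if_neg (show ¬ n ≤ 0 by omega)]
    simp [String.append_assoc, ← String.ofList_append]
  | case2 n acc h =>
    rw [pvLoopA, if_neg h, pvRec, if_pos (show n ≤ 0 by omega)]
    simp

-- One least-significant-digit step of the reference recursion.
theorem pvRec_step (x g : Int) (hx : 0 ≤ x) (hg : -1 ≤ g) :
    pvRec (x + 26 * (g + 1) + 1)
      = pvRec (x / 26 + (g + 1)) ++ String.ofList [pvLetter (x % 26)] := by
  rw [pvRec, if_neg (by omega)]
  have h1 : x + 26 * (g + 1) + 1 - 1 = x + (g + 1) * 26 := by ring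
  rw [h1, PySem.Int.floordiv_eq_ediv_of_pos (by omega : (0:Int) < 26),
      PySem.Int.mod_eq_emod_of_pos (by omega : (0:Int) < 26),
      Int.add_mul_ediv_right _ _ (by omega : (26:Int) ≠ 0)]
  have h2 : (x + (g + 1) * 26) % 26 = x % 26 := by omega
  rw [h2]

theorem pvRec_small (x : Int) (hx : 0 ≤ x) (hx' : x < 26) :
    pvRec (x + 1) = String.ofList [pvLetter x] := by
  have h := pvRec_step x (-1) hx (by omega)
  simp only [neg_add_cancel, mul_zero, add_zero] at h
  rw [h, Int.ediv_eq_zero_of_lt hx (by omega), Int.emod_eq_of_lt hx (by omega)]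
  rw [pvRec, if_pos (by omega)]
  simp

-- Most-significant-digit characterisation of the reference recursion.
theorem pvRec_msd (k : Nat) : ∀ j : Int, 0 ≤ j → j < 26 ^ (k + 2) →
    pvRec (j + pvGeom (k + 1) + 1)
      = String.ofList [pvLetter (j / 26 ^ (k + 1))]
        ++ pvRec (j % 26 ^ (k + 1) + pvGeom k + 1) := by
  induction k with
  | zero =>
    intro j hj hj'
    norm_num at hj'
    have hd0 : 0 ≤ j / 26 := by omega
    have hd1 : j / 26 < 26 := by omega
    have step := pvRec_step j 0 hj (by omega)
    have e1 : pvGeom (0 + 1) = (26:Int) := by norm_num [pvGeom]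
    have e2 : pvGeom 0 = (0:Int) := rfl
    have e3 : (26:Int) ^ (0 + 1) = 26 := by norm_num
    rw [e1, e2, e3, add_zero, show j + 26 + 1 = j + 26 * (0 + 1) + 1 from by ring, step,
        show j / 26 + (0 + 1) = j / 26 + 1 from by ring, pvRec_small _ hd0 hd1,
        pvRec_small (j % 26) (by omega) (by omega)]
  | succ k ih =>
    intro j hj hj'
    have hpow : (0:Int) < 26 ^ (k + 1) := by positivity
    have hpow2 : (0:Int) < 26 ^ (k + 2) := by positivity
    have hdiv_nonneg : 0 ≤ j / 26 := by omega
    have hdiv_lt : j / 26 < 26 ^ (k + 2) := by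
      have h : (26:Int) ^ (k + 1 + 2) = 26 * 26 ^ (k + 2) := by ring
      omega
    -- LHS: peel the least-significant digit
    have hLHS : pvRec (j + pvGeom (k + 2) + 1)
        = pvRec (j / 26 + pvGeom (k + 1) + 1) ++ String.ofList [pvLetter (j % 26)] := by
      have hg : pvGeom (k + 2) = 26 * (pvGeom (k + 1) + 1) := rfl
      rw [hg, pvRec_step j (pvGeom (k + 1)) hj (by have := pvGeom_nonneg (k + 1); omega)]
      ring_nf
    have hIH := ih (j / 26) hdiv_nonneg hdiv_lt
    have hdd : (j / 26) / 26 ^ (k + 1) = j / 26 ^ (k + 2) := by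
      rw [Int.ediv_ediv_of_nonneg (by omega : (0:Int) ≤ 26)]
      congr 1
      ring
    -- RHS: peel the least-significant digit of the remainder term
    have hr_nonneg : 0 ≤ j % 26 ^ (k + 2) := Int.emod_nonneg j (by omega)
    have hRHS : pvRec (j % 26 ^ (k + 2) + pvGeom (k + 1) + 1)
        = pvRec ((j % 26 ^ (k + 2)) / 26 + pvGeom k + 1)
          ++ String.ofList [pvLetter ((j % 26 ^ (k + 2)) % 26)] := by
      have hg : pvGeom (k + 1) = 26 * (pvGeom k + 1) := rfl
      rw [hg, pvRec_step _ (pvGeom k) hr_nonneg (by have := pvGeom_nonneg k; omega)]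
      ring_nf
    have hmm : (j % 26 ^ (k + 2)) % 26 = j % 26 :=
      Int.emod_emod_of_dvd j ⟨26 ^ (k + 1), by ring⟩
    have hmixed : (j % 26 ^ (k + 2)) / 26 = (j / 26) % 26 ^ (k + 1) := by
      rw [Int.emod_def j (26 ^ (k + 2)), Int.emod_def (j / 26) (26 ^ (k + 1))]
      have h : j - 26 ^ (k + 2) * (j / 26 ^ (k + 2))
          = j + (-(26 ^ (k + 1) * (j / 26 ^ (k + 2)))) * 26 := by ring
      rw [h, Int.add_mul_ediv_right _ _ (by omega : (26:Int) ≠ 0), ← hdd]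
      ring
    rw [hLHS, hIH, hdd, hRHS, hmm, hmixed]
    simp [String.append_assoc]

-- Phase 1 returns (m+1, 26^(m+1), pvGeom (m+1)) with pvGeom m < n ≤ pvGeom (m+1).
theorem pvGrow_spec (f : Nat) : ∀ (n : Int) (k : Nat) (hb : 0 < (26:Int) ^ (k + 1)),
    (n - pvGeom (k + 1)).toNat ≤ f → pvGeom k < n →
    ∃ m : Nat, pvGrow n ((k : Int) + 1) (26 ^ (k + 1)) (pvGeom (k + 1)) hb
        = (((m : Int) + 1), 26 ^ (m + 1), pvGeom (m + 1))
      ∧ pvGeom m < n ∧ n ≤ pvGeom (m + 1) := by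
  induction f with
  | zero =>
    intro n k hb hf hk
    rw [pvGrow, dif_neg (by omega)]
    exact ⟨k, rfl, hk, by omega⟩
  | succ f ihf =>
    intro n k hb hf hk
    by_cases h : pvGeom (k + 1) < n
    · rw [pvGrow, dif_pos h]
      have e1 : (26:Int) ^ (k + 1) * 26 = 26 ^ (k + 2) := by ring
      have e2 : pvGeom (k + 1) + 26 ^ (k + 1) * 26 = pvGeom (k + 2) := by
        rw [pvGeom_succ_pow (k + 1)]; ring
      have hpow : (26:Int) ≤ 26 ^ (k + 2) := by
        calc (26:Int) = 26 ^ 1 := (pow_one 26).symm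
          _ ≤ 26 ^ (k + 2) := pow_le_pow_right₀ (by omega) (by omega)
      have hf' : (n - pvGeom (k + 2)).toNat ≤ f := by
        have := pvGeom_succ_pow (k + 1)
        omega
      obtain ⟨m, hm, hm1, hm2⟩ := ihf n (k + 1) (by positivity) hf' h
      refine ⟨m, ?_, hm1, hm2⟩
      rw [pvGrow_congr n ((k:Int) + 1 + 1) (((k + 1 : Nat) : Int) + 1)
            (26 ^ (k + 1) * 26) (26 ^ (k + 2)) (pvGeom (k + 1) + 26 ^ (k + 1) * 26) (pvGeom (k + 2))
            (by omega) (by positivity) (by push_cast; ring) e1 e2]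
      exact hm
    · rw [pvGrow, dif_neg h]
      exact ⟨k, rfl, hk, by omega⟩

-- Phase 2 emits the same string as the reference recursion.
theorem pvEmit_spec (k : Nat) : ∀ (j : Int) (out : List Char), 0 ≤ j → j < 26 ^ (k + 1) →
    String.ofList (pvEmit ((k : Int) + 1) j (26 ^ (k + 1)) out)
      = String.ofList out ++ pvRec (j + pvGeom k + 1) := by
  induction k with
  | zero =>
    intro j out hj hj'
    norm_num at hj'
    rw [pvEmit, if_pos (by norm_num : (0:Int) < ((0:Nat):Int) + 1)]
    have h1 : PySem.Int.floordiv ((26:Int) ^ (0 + 1)) 26 = 1 := by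
      rw [PySem.Int.floordiv_eq_ediv_of_pos (by omega)]; norm_num
    rw [h1]
    have h2 : PySem.Int.mod j 1 = 0 := by
      rw [PySem.Int.mod_eq_emod_of_pos (by omega)]; exact Int.emod_one j
    have h3 : PySem.Int.floordiv j 1 = j := by
      rw [PySem.Int.floordiv_eq_ediv_of_pos (by omega)]; exact Int.ediv_one j
    rw [h2, h3, show ((0:Nat):Int) + 1 - 1 = 0 from by norm_num]
    rw [pvEmit, if_neg (by norm_num)]
    simp only [pvGeom, add_zero]
    rw [pvRec_small j hj (by omega)]
    simp [← String.ofList_append]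
  | succ k ih =>
    intro j out hj hj'
    have hpow : (0:Int) < 26 ^ (k + 1) := by positivity
    rw [pvEmit, if_pos (by push_cast; omega)]
    have h1 : PySem.Int.floordiv ((26:Int) ^ (k + 2)) 26 = 26 ^ (k + 1) := by
      rw [PySem.Int.floordiv_eq_ediv_of_pos (by omega)]
      rw [show (26:Int) ^ (k + 2) = 26 ^ (k + 1) * 26 by ring]
      exact Int.mul_ediv_cancel _ (by omega)
    have h2 : PySem.Int.mod j (26 ^ (k + 1)) = j % 26 ^ (k + 1) :=
      PySem.Int.mod_eq_emod_of_pos (by omega)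
    have h3 : PySem.Int.floordiv j (26 ^ (k + 1)) = j / 26 ^ (k + 1) :=
      PySem.Int.floordiv_eq_ediv_of_pos (by omega)
    rw [h1, h2, h3]
    rw [show ((k + 1 : Nat) : Int) + 1 - 1 = ((k : Nat) : Int) + 1 from by push_cast; ring]
    rw [ih (j % 26 ^ (k + 1)) _ (Int.emod_nonneg j (by omega)) (Int.emod_lt_of_pos j (by omega))]
    rw [pvRec_msd k j hj hj']
    rw [String.ofList_append, String.append_assoc]

-- B equals the reference recursion.
theorem pvAlt_rec (n : Int) : generate_labels_alt n = pvRec n := by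
  by_cases hn : n ≤ 0
  · rw [generate_labels_alt, if_pos hn, pvRec, if_pos hn]
  · rw [generate_labels_alt, if_neg hn]
    have h0 : pvGeom 0 < n := by simp only [pvGeom]; omega
    obtain ⟨m, hm, hm1, hm2⟩ :=
      pvGrow_spec (n - pvGeom 1).toNat n 0 (by omega) (le_refl _) h0
    rw [pvGrow_congr n 1 (((0:Nat):Int) + 1) 26 (26 ^ (0 + 1)) 26 (pvGeom (0 + 1))
          (by omega) (by omega) (by norm_num) (by norm_num) (by norm_num [pvGeom])]
    rw [hm]
    have hjg : pvGeom (m + 1) - 26 ^ (m + 1) = pvGeom m := by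
      rw [pvGeom_succ_pow m]; ring
    simp only [hjg]
    have hj0 : 0 ≤ n - pvGeom m - 1 := by omega
    have hj1 : n - pvGeom m - 1 < 26 ^ (m + 1) := by
      have := pvGeom_succ_pow m; omega
    rw [pvEmit_spec m (n - pvGeom m - 1) [] hj0 hj1,
        show n - pvGeom m - 1 + pvGeom m + 1 = n from by ring]
    rfl

-- ===== VERDICT (by name: the statement is the Claim_ definition above) =====
theorem generate_labels_spec : Claim_equal_generate_labels := by
  intro n _
  unfold Spec_generate_labels generate_labels
  rw [pvLoopA_rec, pvAlt_rec]
  simp
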